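-- pv_equiv track=rewrite | github.com/Hayeong1224/Algorithm | 프로그래머스/3/64064. 불량 사용자/불량 사용자.py | solution
-- ===== SOURCE A (Python) =====
-- def solution(user_id, banned_id):
--     n = len(banned_id)
--     # 후보 찾기
--     candidates = [[] for _ in range(n)]
--     for i, id in enumerate(banned_id):
--         for user in [u_id for u_id in user_id if len(id) == len(u_id)]:
--             is_candidate = True
--             for c1, c2 in zip(id, user):
--                 if c1 != '*' and c1 != c2:
--                     is_candidate = False
--                     break
--             if is_candidate:
--                 candidates[i].append(user)
--     answer = set()
--
--     # 목록 찾기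
--     def dfs(banned, i):
--         if i == n:
--             answer.add(tuple(sorted(banned)))
--             return
--
--         for c in candidates[i]:
--             if c not in banned:
--                 banned.append(c)
--                 dfs(banned, i+1)
--                 banned.pop()
--         return
--
--     dfs([],0)
--     return len(answer)
-- ===== SOURCE B (Python) =====
-- def solution(user_id, banned_id):
--     by_len = {}
--     for u in user_id:
--         by_len.setdefault(len(u), []).append(u)
--     candidates = [
--         [u for u in by_len.get(len(b), [])
--          if all(p == '*' or p == c for p, c in zip(b, u))]
--         for b in banned_id
--     ]
--     combos = [[]]
--     for cand in candidates:
--         combos = [combo + [c] for combo in combos for c in cand if c not in combo]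
--     answer = {tuple(sorted(combo)) for combo in combos}
--     return len(answer)
-- ===== Notes on version B (the rewrite author's own statement) =====
-- stated objective: idiomatic
-- what changed: Replaces the recursive backtracking dfs (mutable banned list + answer set + sorted-tuple dedup inside the recursion) with an iteratively built cartesian product of the candidate lists (layer by layer, skipping users already in a partial combo) collected by a set comprehension, and the candidate phase uses a length-indexed grouping dict built once instead of re-filtering user_id by length for every banned id.
import Mathlib
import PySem

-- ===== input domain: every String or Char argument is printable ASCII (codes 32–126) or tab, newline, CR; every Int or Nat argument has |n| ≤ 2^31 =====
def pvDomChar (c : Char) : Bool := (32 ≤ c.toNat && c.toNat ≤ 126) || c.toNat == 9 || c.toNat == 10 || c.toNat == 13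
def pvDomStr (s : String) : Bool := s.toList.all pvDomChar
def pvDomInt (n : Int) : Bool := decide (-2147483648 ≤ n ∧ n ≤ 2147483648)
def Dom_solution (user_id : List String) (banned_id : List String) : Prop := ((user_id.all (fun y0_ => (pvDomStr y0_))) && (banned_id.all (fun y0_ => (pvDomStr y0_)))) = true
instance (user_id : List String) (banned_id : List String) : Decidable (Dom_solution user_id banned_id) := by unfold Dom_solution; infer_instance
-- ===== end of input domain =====

-- ===== PORT A =====
-- B replaces A's recursive backtracking dfs by an iteratively built cartesian product
-- filtered for duplicate users, with a length-indexed grouping dict for the candidate phase.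

-- Port of A's inner character loop with break: is_candidate flag over zip(id, user).
def matchA : List (Char × Char) → Bool
  | [] => true
  | (c1, c2) :: rest => if c1 ≠ '*' ∧ c1 ≠ c2 then false else matchA rest

-- candidates[i] for banned id `id`: loop over equal-length users, append the matches.
def candsA (user_id : List String) (id : String) : List String :=
  (user_id.filter (fun u => PySem.Str.len id == PySem.Str.len u)).foldl
    (fun acc u => if matchA (id.toList.zip u.toList) then acc ++ [u] else acc) []

mutual
-- dfs(banned, i): at i = n add tuple(sorted(banned)); else loop over candidates[i].
def dfsA : List (List String) → List String → PySem.Set (List String) → PySem.Set (List String)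
  | [], banned, ans => ans.add (PySem.List.sorted banned (fun x => x) false)
  | cs :: rest, banned, ans => dfsLoopA cs rest banned ans
termination_by rest _ _ => (rest.length, 0, 0)

-- the 'for c in candidates[i]' loop body: skip c in banned, else recurse with banned+[c].
def dfsLoopA : List String → List (List String) → List String → PySem.Set (List String) → PySem.Set (List String)
  | [], _, _, ans => ans
  | c :: cs, rest, banned, ans =>
      dfsLoopA cs rest banned (if c ∈ banned then ans else dfsA rest (banned ++ [c]) ans)
termination_by cs rest _ _ => (rest.length, 1, cs.length)
end

def solution (user_id : List String) (banned_id : List String) : Int :=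
  PySem.Set.len (dfsA (banned_id.map (candsA user_id)) [] PySem.Set.empty)

-- ===== PORT B =====
-- by_len: users grouped by length, built once (setdefault(len(u), []).append(u)).
def byLenB (user_id : List String) : PySem.Dict Int (List String) :=
  user_id.foldl (fun d u => d.modify (PySem.Str.len u) [] (· ++ [u])) PySem.Dict.empty

-- candidate list for banned id b: filter the equal-length group by the '*'-wildcard match.
def candsB (d : PySem.Dict Int (List String)) (b : String) : List String :=
  (d.getD (PySem.Str.len b) []).filter
    (fun u => (b.toList.zip u.toList).all (fun pc => pc.1 == '*' || pc.1 == pc.2))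

def solution_alt (user_id : List String) (banned_id : List String) : Int :=
  let by_len := byLenB user_id
  let candidates := banned_id.map (candsB by_len)
  let combos := candidates.foldl
    (fun combos cand =>
      combos.flatMap (fun combo => (cand.filter (fun c => c ∉ combo)).map (fun c => combo ++ [c])))
    [[]]
  let answer := combos.foldl
    (fun s combo => PySem.Set.add s (PySem.List.sorted combo (fun x => x) false)) PySem.Set.empty
  PySem.Set.len answer

-- ===== PRECONDITION & SPEC =====
def Spec_solution (user_id : List String) (banned_id : List String) (out : Int) : Prop := out = solution_alt user_id banned_id
instance (user_id : List String) (banned_id : List String) (out : Int) : Decidable (Spec_solution user_id banned_id out) := by unfold Spec_solution; infer_instance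

-- ===== CLAIM (what is proved, stated in full; the proofs are below) =====
def Claim_equal_solution : Prop := ∀ (user_id : List String) (banned_id : List String), Dom_solution user_id banned_id → Spec_solution user_id banned_id (solution user_id banned_id)

-- ===== LEMMAS AND PROOFS =====

-- All selection tuples from the candidate lists (the recursive form of the product).
def selections : List (List String) → List (List String)
  | [] => [[]]
  | cs :: rest => cs.flatMap (fun c => (selections rest).map (c :: ·))

-- dfs's incremental distinctness condition along a selection, starting from `banned`.
def okSel : List String → List String → Prop
  | _, [] => True
  | b, c :: cs => c ∉ b ∧ okSel (b ++ [c]) cs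

theorem matchA_eq_all (ps : List (Char × Char)) :
    matchA ps = ps.all (fun pc => pc.1 == '*' || pc.1 == pc.2) := by
  induction ps with
  | nil => rfl
  | cons p rest ih =>
    obtain ⟨c1, c2⟩ := p
    by_cases h1 : c1 = '*' <;> by_cases h2 : c1 = c2 <;>
      simp [matchA, ih, h1, h2]

theorem byLenB_getD_aux (l : List String) :
    ∀ (d : PySem.Dict Int (List String)) (k : Int),
      (l.foldl (fun d u => d.modify (PySem.Str.len u) [] (· ++ [u])) d).getD k []
        = d.getD k [] ++ l.filter (fun u => PySem.Str.len u == k) := by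
  induction l with
  | nil => intro d k; simp
  | cons u l ih =>
    intro d k
    rw [List.foldl_cons, ih]
    by_cases h : k = (u.length : Int)
    · simp [PySem.Str.len, List.filter_cons, PySem.Dict.getD_modify, h]
    · have h2 : ¬ ((u.length : Int) = k) := fun he => h he.symm
      simp [PySem.Str.len, List.filter_cons, PySem.Dict.getD_modify, h, h2]

theorem byLenB_getD (user_id : List String) (k : Int) :
    (byLenB user_id).getD k [] = user_id.filter (fun u => PySem.Str.len u == k) := by
  rw [byLenB, byLenB_getD_aux]
  simp [PySem.Dict.getD_empty]

theorem cands_eq (user_id : List String) (b : String) :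
    candsA user_id b = candsB (byLenB user_id) b := by
  rw [candsA, candsB, PySem.List.foldl_append_if_eq_filter, byLenB_getD, List.nil_append]
  have h1 : user_id.filter (fun u => PySem.Str.len b == PySem.Str.len u)
      = user_id.filter (fun u => PySem.Str.len u == PySem.Str.len b) := by
    apply List.filter_congr
    intro u _
    simp [beq_iff_eq, eq_comm]
  rw [h1]
  apply List.filter_congr
  intro u _
  rw [matchA_eq_all]

theorem mem_selections_cons (cs : List String) (rest : List (List String)) (x : List String) :
    x ∈ selections (cs :: rest) ↔ ∃ c ∈ cs, ∃ s ∈ selections rest, x = c :: s := by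
  simp [selections, eq_comm]

theorem mem_dfsLoopA (rest : List (List String))
    (ihA : ∀ b a x, x ∈ dfsA rest b a ↔
      x ∈ a ∨ ∃ s ∈ selections rest, okSel b s ∧ x = PySem.List.sorted (b ++ s) (fun y => y) false) :
    ∀ (cs : List String) b a x, x ∈ dfsLoopA cs rest b a ↔
      x ∈ a ∨ ∃ c ∈ cs, c ∉ b ∧ ∃ s ∈ selections rest, okSel (b ++ [c]) s ∧
        x = PySem.List.sorted (b ++ c :: s) (fun y => y) false := by
  intro cs
  induction cs with
  | nil => intro b a x; simp [dfsLoopA]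
  | cons c cs ih =>
    intro b a x
    rw [dfsLoopA, ih]
    by_cases hc : c ∈ b
    · simp only [if_pos hc]
      constructor
      · rintro (hx | h)
        · exact Or.inl hx
        · obtain ⟨c', hc', h⟩ := h
          exact Or.inr ⟨c', List.mem_cons_of_mem _ hc', h⟩
      · rintro (hx | ⟨c', hc', hcb, h⟩)
        · exact Or.inl hx
        · rcases List.mem_cons.1 hc' with rfl | hc'
          · exact absurd hc hcb
          · exact Or.inr ⟨c', hc', hcb, h⟩
    · simp only [if_neg hc]
      rw [ihA]
      constructor
      · rintro ((hx | ⟨s, hs, hok, hx⟩) | ⟨c', hc', h⟩)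
        · exact Or.inl hx
        · refine Or.inr ⟨c, List.mem_cons_self .., hc, s, hs, hok, ?_⟩
          rw [hx]; simp
        · exact Or.inr ⟨c', List.mem_cons_of_mem _ hc', h⟩
      · rintro (hx | ⟨c', hc', hcb, s, hs, hok, hx⟩)
        · exact Or.inl (Or.inl hx)
        · rcases List.mem_cons.1 hc' with rfl | hc'
          · refine Or.inl (Or.inr ⟨s, hs, hok, ?_⟩)
            rw [hx]; simp
          · exact Or.inr ⟨c', hc', hcb, s, hs, hok, hx⟩

theorem mem_dfsA (rest : List (List String)) :
    ∀ b a x, x ∈ dfsA rest b a ↔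
      x ∈ a ∨ ∃ s ∈ selections rest, okSel b s ∧ x = PySem.List.sorted (b ++ s) (fun y => y) false := by
  induction rest with
  | nil =>
    intro b a x
    rw [dfsA]
    simp [PySem.Set.mem_add, selections, okSel]
  | cons cs rest ih =>
    intro b a x
    rw [dfsA, mem_dfsLoopA rest ih]
    constructor
    · rintro (hx | ⟨c, hc, hcb, s, hs, hok, hx⟩)
      · exact Or.inl hx
      · refine Or.inr ⟨c :: s, (mem_selections_cons ..).2 ⟨c, hc, s, hs, rfl⟩, ⟨hcb, hok⟩, hx⟩
    · rintro (hx | ⟨t, ht, hok, hx⟩)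
      · exact Or.inl hx
      · obtain ⟨c, hc, s, hs, rfl⟩ := (mem_selections_cons ..).1 ht
        exact Or.inr ⟨c, hc, hok.1, s, hs, hok.2, hx⟩

theorem nodup_dfsA (rest : List (List String)) :
    ∀ b a, List.Nodup a → List.Nodup (dfsA rest b a) := by
  induction rest with
  | nil => intro b a h; rw [dfsA]; exact PySem.Set.nodup_add _ _ h
  | cons cs rest ih =>
    intro b a h
    rw [dfsA]
    induction cs generalizing a with
    | nil => rw [dfsLoopA]; exact h
    | cons c cs ihc =>
      rw [dfsLoopA]
      apply ihc
      by_cases hc : c ∈ b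
      · simpa [hc] using h
      · simpa [hc] using ih (b ++ [c]) a h

theorem mem_foldl_addB (combos : List (List String)) :
    ∀ (s : PySem.Set (List String)) (x : List String),
      x ∈ combos.foldl (fun s combo =>
          PySem.Set.add s (PySem.List.sorted combo (fun y => y) false)) s ↔
        x ∈ s ∨ ∃ cb ∈ combos, x = PySem.List.sorted cb (fun y => y) false := by
  induction combos with
  | nil => intro s x; simp
  | cons cb combos ih =>
    intro s x
    rw [List.foldl_cons, ih]
    simp only [PySem.Set.mem_add, List.mem_cons]
    constructor
    · rintro ((hx | rfl) | ⟨c, hc, h⟩)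
      · exact Or.inl hx
      · exact Or.inr ⟨cb, Or.inl rfl, rfl⟩
      · exact Or.inr ⟨c, Or.inr hc, h⟩
    · rintro (hx | ⟨c, hc, rfl⟩)
      · exact Or.inl (Or.inl hx)
      · rcases hc with rfl | hc
        · exact Or.inl (Or.inr rfl)
        · exact Or.inr ⟨c, hc, rfl⟩

theorem nodup_foldl_addB (combos : List (List String)) :
    ∀ (s : PySem.Set (List String)), List.Nodup s → List.Nodup
      (combos.foldl (fun s combo =>
          PySem.Set.add s (PySem.List.sorted combo (fun y => y) false)) s) := by
  induction combos with
  | nil => intro s h; exact h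
  | cons cb combos ih =>
    intro s h
    rw [List.foldl_cons]
    exact ih _ (PySem.Set.nodup_add _ _ h)

theorem mem_foldl_combos (l : List (List String)) :
    ∀ (acc : List (List String)) (x : List String),
      x ∈ l.foldl (fun combos cand =>
          combos.flatMap (fun combo => (cand.filter (fun c => c ∉ combo)).map (fun c => combo ++ [c]))) acc ↔
        ∃ p ∈ acc, ∃ s ∈ selections l, okSel p s ∧ x = p ++ s := by
  induction l with
  | nil => intro acc x; simp [selections, okSel, eq_comm]
  | cons cs l ih =>
    intro acc x
    rw [List.foldl_cons, ih]
    constructor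
    · rintro ⟨p', hp', s, hs, hok, rfl⟩
      rw [List.mem_flatMap] at hp'
      obtain ⟨p, hp, hp'⟩ := hp'
      rw [List.mem_map] at hp'
      obtain ⟨c, hc, rfl⟩ := hp'
      rw [List.mem_filter] at hc
      obtain ⟨hc1, hc2⟩ := hc
      have hc2' : c ∉ p := by simpa using hc2
      exact ⟨p, hp, c :: s, (mem_selections_cons ..).2 ⟨c, hc1, s, hs, rfl⟩, ⟨hc2', hok⟩, by simp⟩
    · rintro ⟨p, hp, t, ht, hok, rfl⟩
      obtain ⟨c, hc, s, hs, rfl⟩ := (mem_selections_cons ..).1 ht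
      have hok' : c ∉ p ∧ okSel (p ++ [c]) s := hok
      refine ⟨p ++ [c], ?_, s, hs, hok'.2, by simp⟩
      rw [List.mem_flatMap]
      exact ⟨p, hp, List.mem_map.2 ⟨c, List.mem_filter.2 ⟨hc, by simpa using hok'.1⟩, rfl⟩⟩

-- ===== VERDICT (by name: the statement is the Claim_ definition above) =====
theorem solution_spec : Claim_equal_solution := by
  intro user_id banned_id _
  unfold Spec_solution solution solution_alt
  have hcand : banned_id.map (candsB (byLenB user_id)) = banned_id.map (candsA user_id) := by
    apply List.map_congr_left
    intro b _
    exact (cands_eq user_id b).symm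
  simp only [hcand]
  set C := banned_id.map (candsA user_id) with hC
  have hperm : (dfsA C [] PySem.Set.empty).Perm
      ((C.foldl (fun combos cand =>
          combos.flatMap (fun combo => (cand.filter (fun c => c ∉ combo)).map (fun c => combo ++ [c]))) [[]]).foldl
        (fun s combo => PySem.Set.add s (PySem.List.sorted combo (fun x => x) false)) PySem.Set.empty) := by
    apply (List.perm_ext_iff_of_nodup ?_ ?_).2
    · intro x
      rw [mem_dfsA, mem_foldl_addB]
      have hempty : ¬ x ∈ (PySem.Set.empty : PySem.Set (List String)) := by
        simp [PySem.Set.empty]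
      simp only [hempty, false_or]
      constructor
      · rintro ⟨s, hs, hok, hx⟩
        refine ⟨s, ?_, by simpa using hx⟩
        rw [mem_foldl_combos]
        exact ⟨[], by simp, s, hs, hok, by simp⟩
      · rintro ⟨cb, hcb, hx⟩
        rw [mem_foldl_combos] at hcb
        obtain ⟨p, hp, s, hs, hok, rfl⟩ := hcb
        simp only [List.mem_singleton] at hp
        subst hp
        exact ⟨s, by simpa using hs, hok, by simpa using hx⟩
    · exact nodup_dfsA C [] PySem.Set.empty (by simp [PySem.Set.empty])
    · exact nodup_foldl_addB _ PySem.Set.empty (by simp [PySem.Set.empty])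
  simp only [PySem.Set.len]
  exact congrArg (fun n : Nat => (n : Int)) hperm.length_eq
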